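-- pv_equiv track=rewrite | github.com/lemer914/Clustering-DNA | Q_gram_algorithm.py | get_binary_signatures_blocked
-- ===== SOURCE A (Python) =====
-- ONE_GRAMS = ('A', 'C', 'G', 'T') # all possible one-grams from our alphabet
--
-- TWO_GRAMS = ('AA', 'AC', 'AG', 'AT', 'CA', 'CC', 'CG', 'CT', 'GA', 'GC', 'GG', 'GT', 'TA', 'TC', 'TG', 'TT')
--
-- THREE_GRAMS = ('AAA', 'AAC', 'AAG', 'AAT', 'ACA', 'ACC', 'ACG', 'ACT', 'AGA', 'AGC', 'AGG', 'AGT', 'ATA',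
--                'ATC', 'ATG', 'ATT', 'CAA', 'CAC', 'CAG', 'CAT', 'CCA', 'CCC', 'CCG', 'CCT', 'CGA', 'CGC',
--                'CGG', 'CGT', 'CTA', 'CTC', 'CTG', 'CTT', 'GAA', 'GAC', 'GAG', 'GAT', 'GCA', 'GCC', 'GCG',
--                'GCT', 'GGA', 'GGC', 'GGG', 'GGT', 'GTA', 'GTC', 'GTG', 'GTT', 'TAA', 'TAC', 'TAG', 'TAT',
--                'TCA', 'TCC', 'TCG', 'TCT', 'TGA', 'TGC', 'TGG', 'TGT', 'TTA', 'TTC', 'TTG', 'TTT')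
--
-- FOUR_GRAMS = ('AAAA', 'AAAC', 'AAAG', 'AAAT', 'AACA', 'AACC', 'AACG', 'AACT', 'AAGA', 'AAGC', 'AAGG', 'AAGT',
--               'AATA', 'AATC', 'AATG', 'AATT', 'ACAA', 'ACAC', 'ACAG', 'ACAT', 'ACCA', 'ACCC', 'ACCG', 'ACCT',
--               'ACGA', 'ACGC', 'ACGG', 'ACGT', 'ACTA', 'ACTC', 'ACTG', 'ACTT', 'AGAA', 'AGAC', 'AGAG', 'AGAT',
--               'AGCA', 'AGCC', 'AGCG', 'AGCT', 'AGGA', 'AGGC', 'AGGG', 'AGGT', 'AGTA', 'AGTC', 'AGTG', 'AGTT',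
--               'ATAA', 'ATAC', 'ATAG', 'ATAT', 'ATCA', 'ATCC', 'ATCG', 'ATCT', 'ATGA', 'ATGC', 'ATGG', 'ATGT',
--               'ATTA', 'ATTC', 'ATTG', 'ATTT', 'CAAA', 'CAAC', 'CAAG', 'CAAT', 'CACA', 'CACC', 'CACG', 'CACT',
--               'CAGA', 'CAGC', 'CAGG', 'CAGT', 'CATA', 'CATC', 'CATG', 'CATT', 'CCAA', 'CCAC', 'CCAG', 'CCAT',
--               'CCCA', 'CCCC', 'CCCG', 'CCCT', 'CCGA', 'CCGC', 'CCGG', 'CCGT', 'CCTA', 'CCTC', 'CCTG', 'CCTT',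
--               'CGAA', 'CGAC', 'CGAG', 'CGAT', 'CGCA', 'CGCC', 'CGCG', 'CGCT', 'CGGA', 'CGGC', 'CGGG', 'CGGT',
--               'CGTA', 'CGTC', 'CGTG', 'CGTT', 'CTAA', 'CTAC', 'CTAG', 'CTAT', 'CTCA', 'CTCC', 'CTCG', 'CTCT',
--               'CTGA', 'CTGC', 'CTGG', 'CTGT', 'CTTA', 'CTTC', 'CTTG', 'CTTT', 'GAAA', 'GAAC', 'GAAG', 'GAAT',
--               'GACA', 'GACC', 'GACG', 'GACT', 'GAGA', 'GAGC', 'GAGG', 'GAGT', 'GATA', 'GATC', 'GATG', 'GATT',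
--               'GCAA', 'GCAC', 'GCAG', 'GCAT', 'GCCA', 'GCCC', 'GCCG', 'GCCT', 'GCGA', 'GCGC', 'GCGG', 'GCGT',
--               'GCTA', 'GCTC', 'GCTG', 'GCTT', 'GGAA', 'GGAC', 'GGAG', 'GGAT', 'GGCA', 'GGCC', 'GGCG', 'GGCT',
--               'GGGA', 'GGGC', 'GGGG', 'GGGT', 'GGTA', 'GGTC', 'GGTG', 'GGTT', 'GTAA', 'GTAC', 'GTAG', 'GTAT',
--               'GTCA', 'GTCC', 'GTCG', 'GTCT', 'GTGA', 'GTGC', 'GTGG', 'GTGT', 'GTTA', 'GTTC', 'GTTG', 'GTTT',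
--               'TAAA', 'TAAC', 'TAAG', 'TAAT', 'TACA', 'TACC', 'TACG', 'TACT', 'TAGA', 'TAGC', 'TAGG', 'TAGT',
--               'TATA', 'TATC', 'TATG', 'TATT', 'TCAA', 'TCAC', 'TCAG', 'TCAT', 'TCCA', 'TCCC', 'TCCG', 'TCCT',
--               'TCGA', 'TCGC', 'TCGG', 'TCGT', 'TCTA', 'TCTC', 'TCTG', 'TCTT', 'TGAA', 'TGAC', 'TGAG', 'TGAT',
--               'TGCA', 'TGCC', 'TGCG', 'TGCT', 'TGGA', 'TGGC', 'TGGG', 'TGGT', 'TGTA', 'TGTC', 'TGTG', 'TGTT',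
--               'TTAA', 'TTAC', 'TTAG', 'TTAT', 'TTCA', 'TTCC', 'TTCG', 'TTCT', 'TTGA', 'TTGC', 'TTGG', 'TTGT',
--               'TTTA', 'TTTC', 'TTTG', 'TTTT')
--
-- BLOCK_SIZE = 22 # binary signatures for each sequence calculated in blocks of this size
--
-- def get_binary_signatures_blocked(S, q):
--     binary_sigs = {}
--     current_sig = []
--     if q == 1:
--         q_grams = ONE_GRAMS
--     elif q == 2:
--         q_grams = TWO_GRAMS
--     elif q == 3:
--         q_grams = THREE_GRAMS
--     else:
--         q_grams = FOUR_GRAMS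
--     for x in S:
--         blocks = [x[i:i+BLOCK_SIZE] for i in range(0, len(x), BLOCK_SIZE)]
--         for block in blocks:
--             for gram in q_grams:
--                 if gram in block:
--                     current_sig.append('1')
--                 else:
--                     current_sig.append('0')
--         binary_sigs[x] = "".join(current_sig + [])
--         current_sig.clear()
--     return binary_sigs
-- ===== SOURCE B (Python) =====
-- BLOCK_SIZE = 22
--
-- def get_binary_signatures_blocked(S, q):
--     qe = q if q in (1, 2, 3) else 4
--     grams = ['']
--     for _ in range(qe):
--         grams = [g + c for g in grams for c in 'ACGT']
--     binary_sigs = {}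
--     for x in S:
--         sig = []
--         for start in range(0, len(x), BLOCK_SIZE):
--             block = x[start:start + BLOCK_SIZE]
--             present = {block[i:i + qe] for i in range(len(block) - qe + 1)}
--             sig.extend('1' if g in present else '0' for g in grams)
--         binary_sigs[x] = ''.join(sig)
--     return binary_sigs
-- ===== Notes on version B (the rewrite author's own statement) =====
-- stated objective: alternative
-- what changed: A tests every one of the 4^q q-grams by a substring search inside each block; B scans each block once, collecting its q-length substrings into a set, and answers each gram by a single set-membership lookup.
import Mathlib
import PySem

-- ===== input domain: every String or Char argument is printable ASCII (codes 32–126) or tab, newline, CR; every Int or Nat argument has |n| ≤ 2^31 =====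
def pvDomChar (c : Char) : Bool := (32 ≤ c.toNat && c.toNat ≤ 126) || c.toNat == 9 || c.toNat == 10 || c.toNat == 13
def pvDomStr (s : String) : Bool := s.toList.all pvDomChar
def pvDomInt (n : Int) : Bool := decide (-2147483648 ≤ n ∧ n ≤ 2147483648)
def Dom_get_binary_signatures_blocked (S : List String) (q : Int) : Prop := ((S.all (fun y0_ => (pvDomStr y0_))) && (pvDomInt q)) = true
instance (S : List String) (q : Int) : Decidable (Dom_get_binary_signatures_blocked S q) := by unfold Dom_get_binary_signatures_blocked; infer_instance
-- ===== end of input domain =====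

-- B replaces A's per-gram substring search over each block by a single scan of the block
-- into a set of its q-length substrings, then one hash lookup per gram (objective: alternative).
-- ===== PORT A =====
def ONE_GRAMS : List String := ["A", "C", "G", "T"]

def TWO_GRAMS : List String := ["AA", "AC", "AG", "AT", "CA", "CC", "CG", "CT", "GA", "GC", "GG", "GT", "TA", "TC", "TG", "TT"]

def THREE_GRAMS : List String := ["AAA", "AAC", "AAG", "AAT", "ACA", "ACC", "ACG", "ACT", "AGA", "AGC", "AGG", "AGT", "ATA", "ATC", "ATG", "ATT", "CAA", "CAC", "CAG", "CAT", "CCA", "CCC", "CCG", "CCT", "CGA", "CGC", "CGG", "CGT", "CTA", "CTC", "CTG", "CTT", "GAA", "GAC", "GAG", "GAT", "GCA", "GCC", "GCG", "GCT", "GGA", "GGC", "GGG", "GGT", "GTA", "GTC", "GTG", "GTT", "TAA", "TAC", "TAG", "TAT", "TCA", "TCC", "TCG", "TCT", "TGA", "TGC", "TGG", "TGT", "TTA", "TTC", "TTG", "TTT"]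

def FOUR_GRAMS : List String := ["AAAA", "AAAC", "AAAG", "AAAT", "AACA", "AACC", "AACG", "AACT", "AAGA", "AAGC", "AAGG", "AAGT", "AATA", "AATC", "AATG", "AATT", "ACAA", "ACAC", "ACAG", "ACAT", "ACCA", "ACCC", "ACCG", "ACCT", "ACGA", "ACGC", "ACGG", "ACGT", "ACTA", "ACTC", "ACTG", "ACTT", "AGAA", "AGAC", "AGAG", "AGAT", "AGCA", "AGCC", "AGCG", "AGCT", "AGGA", "AGGC", "AGGG", "AGGT", "AGTA", "AGTC", "AGTG", "AGTT", "ATAA", "ATAC", "ATAG", "ATAT", "ATCA", "ATCC", "ATCG", "ATCT", "ATGA", "ATGC", "ATGG", "ATGT", "ATTA", "ATTC", "ATTG", "ATTT", "CAAA", "CAAC", "CAAG", "CAAT", "CACA", "CACC", "CACG", "CACT", "CAGA", "CAGC", "CAGG", "CAGT", "CATA", "CATC", "CATG", "CATT", "CCAA", "CCAC", "CCAG", "CCAT", "CCCA", "CCCC", "CCCG", "CCCT", "CCGA", "CCGC", "CCGG", "CCGT", "CCTA", "CCTC", "CCTG", "CCTT", "CGAA", "CGAC", "CGAG", "CGAT",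 "CGCA", "CGCC", "CGCG", "CGCT", "CGGA", "CGGC", "CGGG", "CGGT", "CGTA", "CGTC", "CGTG", "CGTT", "CTAA", "CTAC", "CTAG", "CTAT", "CTCA", "CTCC", "CTCG", "CTCT", "CTGA", "CTGC", "CTGG", "CTGT", "CTTA", "CTTC", "CTTG", "CTTT", "GAAA", "GAAC", "GAAG", "GAAT", "GACA", "GACC", "GACG", "GACT", "GAGA", "GAGC", "GAGG", "GAGT", "GATA", "GATC", "GATG", "GATT", "GCAA", "GCAC", "GCAG", "GCAT", "GCCA", "GCCC", "GCCG", "GCCT", "GCGA", "GCGC", "GCGG", "GCGT", "GCTA", "GCTC", "GCTG", "GCTT", "GGAA", "GGAC", "GGAG", "GGAT", "GGCA", "GGCC", "GGCG", "GGCT", "GGGA", "GGGC", "GGGG", "GGGT", "GGTA", "GGTC", "GGTG", "GGTT", "GTAA", "GTAC", "GTAG", "GTAT", "GTCA", "GTCC", "GTCG", "GTCT", "GTGA", "GTGC", "GTGG", "GTGT", "GTTA", "GTTC", "GTTG", "GTTT", "TAAA", "TAAC", "TAAG", "TAAT", "TACA", "TACC", "TACG", "TACT", "TAGA", "TAGC",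 "TAGG", "TAGT", "TATA", "TATC", "TATG", "TATT", "TCAA", "TCAC", "TCAG", "TCAT", "TCCA", "TCCC", "TCCG", "TCCT", "TCGA", "TCGC", "TCGG", "TCGT", "TCTA", "TCTC", "TCTG", "TCTT", "TGAA", "TGAC", "TGAG", "TGAT", "TGCA", "TGCC", "TGCG", "TGCT", "TGGA", "TGGC", "TGGG", "TGGT", "TGTA", "TGTC", "TGTG", "TGTT", "TTAA", "TTAC", "TTAG", "TTAT", "TTCA", "TTCC", "TTCG", "TTCT", "TTGA", "TTGC", "TTGG", "TTGT", "TTTA", "TTTC", "TTTG", "TTTT"]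


def BLOCK_SIZE : Int := 22

def pvSigA (q_grams : List String) (x : String) : String :=
  let blocks := (PySem.List.pyRange 0 (PySem.Str.len x) BLOCK_SIZE).map
      (fun i => PySem.Str.slice x (some i) (some (i + BLOCK_SIZE)))
  let cur := blocks.foldl (fun acc block =>
      q_grams.foldl (fun a gram =>
        a ++ [if PySem.Str.isIn gram block then "1" else "0"]) acc) []
  PySem.Str.join "" (cur ++ [])

def get_binary_signatures_blocked (S : List String) (q : Int) : List (String × String) :=
  let q_grams := if q = 1 then ONE_GRAMS
    else if q = 2 then TWO_GRAMS
    else if q = 3 then THREE_GRAMS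
    else FOUR_GRAMS
  (S.foldl (fun d x => PySem.Dict.insert d x (pvSigA q_grams x))
    (PySem.Dict.empty : PySem.Dict String String)).items

-- ===== PORT B =====
def pvSigB (grams : List String) (qe : Int) (x : String) : String :=
  let sig := (PySem.List.pyRange 0 (PySem.Str.len x) BLOCK_SIZE).foldl (fun acc start =>
      let block := PySem.Str.slice x (some start) (some (start + BLOCK_SIZE))
      let present : PySem.Set String := PySem.Set.ofList
        ((PySem.List.pyRange 0 (PySem.Str.len block - qe + 1) 1).map
          (fun i => PySem.Str.slice block (some i) (some (i + qe))))
      acc ++ grams.map (fun g => if PySem.Set.contains present g then "1" else "0")) []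
  PySem.Str.join "" sig

def get_binary_signatures_blocked_alt (S : List String) (q : Int) : List (String × String) :=
  let qe : Int := if q = 1 ∨ q = 2 ∨ q = 3 then q else 4
  let grams := (PySem.List.pyRange 0 qe 1).foldl
      (fun gs _ => gs.flatMap (fun g => "ACGT".toList.map (fun c => g.push c))) [""]
  (S.foldl (fun d x => PySem.Dict.insert d x (pvSigB grams qe x))
    (PySem.Dict.empty : PySem.Dict String String)).items

-- ===== PRECONDITION & SPEC =====
def Spec_get_binary_signatures_blocked (S : List String) (q : Int) (out : List (String × String)) : Prop := out = get_binary_signatures_blocked_alt S q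
instance (S : List String) (q : Int) (out : List (String × String)) : Decidable (Spec_get_binary_signatures_blocked S q out) := by unfold Spec_get_binary_signatures_blocked; infer_instance

-- ===== CLAIM (what is proved, stated in full; the proofs are below) =====
def Claim_equal_get_binary_signatures_blocked : Prop := ∀ (S : List String) (q : Int), Dom_get_binary_signatures_blocked S q → Spec_get_binary_signatures_blocked S q (get_binary_signatures_blocked S q)

-- ===== LEMMAS AND PROOFS =====

-- g is in the set of qe-length slices of b iff g occurs in b (Python "g in b")
lemma pv_present_contains (g b : String) (qe : Int) (hg : (g.toList.length : Int) = qe) :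
    PySem.Set.contains (PySem.Set.ofList
      ((PySem.List.pyRange 0 (PySem.Str.len b - qe + 1) 1).map
        (fun i => PySem.Str.slice b (some i) (some (i + qe))))) g
    = PySem.Str.isIn g b := by
  have h0 : (0:Int) ≤ qe := by omega
  rw [Bool.eq_iff_iff, PySem.Set.contains_iff, PySem.Set.mem_ofList, List.mem_map]
  rw [show PySem.Str.isIn g b = PySem.Chars.isIn g.toList b.toList from by simp,
    ← PySem.Chars.exists_prefix_drop_iff_isIn]
  constructor
  · rintro ⟨i, hi, hsl⟩
    rw [PySem.List.mem_pyRange_one] at hi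
    refine ⟨i.toNat, ?_⟩
    have h := congrArg String.toList hsl
    rw [PySem.Str.toList_slice, PySem.Chars.slice_eq_listSlice,
      PySem.List.slice_toNat b.toList hi.1 (by omega)] at h
    have hq : (i + qe).toNat - i.toNat = g.toList.length := by omega
    rw [hq] at h
    rw [List.prefix_iff_eq_take]
    exact h.symm
  · rintro ⟨j, hpre⟩
    by_cases hj : j ≤ b.toList.length
    · have hlen : g.toList.length ≤ b.toList.length - j := by
        have := hpre.length_le
        simpa using this
      refine ⟨(j : Int), ?_, ?_⟩
      · rw [PySem.List.mem_pyRange_one]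
        refine ⟨by omega, ?_⟩
        have : PySem.Str.len b = (b.toList.length : Int) := by simp
        omega
      · apply String.toList_inj.mp
        rw [PySem.Str.toList_slice, PySem.Chars.slice_eq_listSlice,
          PySem.List.slice_toNat b.toList (by omega) (by omega)]
        have hq : ((j:Int) + qe).toNat - ((j:Int)).toNat = g.toList.length := by omega
        rw [hq]
        exact (List.prefix_iff_eq_take.mp hpre).symm
    · have hnil : b.toList.drop j = [] := List.drop_eq_nil_of_le (by omega)
      rw [hnil] at hpre
      have hg0 : g.toList = [] := List.prefix_nil.mp hpre
      have hq0 : qe = 0 := by rw [hg0] at hg; simpa using hg.symm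
      refine ⟨0, ?_, ?_⟩
      · rw [PySem.List.mem_pyRange_one]
        refine ⟨le_refl 0, ?_⟩
        have : PySem.Str.len b = (b.toList.length : Int) := by simp
        omega
      · apply String.toList_inj.mp
        rw [PySem.Str.toList_slice, PySem.Chars.slice_eq_listSlice,
          PySem.List.slice_toNat b.toList (by omega) (by omega)]
        simp [hg0]
        left; omega

-- the two per-sequence signature computations agree when every gram has length qe
lemma pv_sig_eq (q_grams : List String) (qe : Int)
    (hlen : ∀ g ∈ q_grams, (g.toList.length : Int) = qe) (x : String) :
    pvSigA q_grams x = pvSigB q_grams qe x := by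
  unfold pvSigA pvSigB
  simp only [List.append_nil, List.foldl_map]
  congr 1
  apply PySem.List.foldl_congr_mem
  intro acc i _
  rw [PySem.List.foldl_append_singleton_eq_map]
  congr 1
  apply List.map_congr_left
  intro g hgm
  rw [pv_present_contains g _ qe (hlen g hgm)]

-- the two dict-building folds agree
lemma pv_fold_eq (S : List String) (grams : List String) (qe : Int)
    (hlen : ∀ g ∈ grams, (g.toList.length : Int) = qe) :
    (S.foldl (fun d x => PySem.Dict.insert d x (pvSigA grams x))
      (PySem.Dict.empty : PySem.Dict String String)).items =
    (S.foldl (fun d x => PySem.Dict.insert d x (pvSigB grams qe x))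
      (PySem.Dict.empty : PySem.Dict String String)).items := by
  rw [PySem.List.foldl_congr_mem S
    (fun d x => PySem.Dict.insert d x (pvSigA grams x))
    (fun d x => PySem.Dict.insert d x (pvSigB grams qe x))
    (PySem.Dict.empty : PySem.Dict String String)
    (fun d x _ => by simp only []; rw [pv_sig_eq grams qe hlen x])]

-- ===== VERDICT (by name: the statement is the Claim_ definition above) =====
set_option maxRecDepth 8192 in
set_option maxHeartbeats 1000000 in
theorem get_binary_signatures_blocked_spec : Claim_equal_get_binary_signatures_blocked := by
  intro S q _
  unfold Spec_get_binary_signatures_blocked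
  simp only [get_binary_signatures_blocked, get_binary_signatures_blocked_alt]
  by_cases h1 : q = 1
  · subst h1
    norm_num
    rw [show ONE_GRAMS = (PySem.List.pyRange 0 (1:Int) 1).foldl
      (fun gs _ => gs.flatMap (fun g => "ACGT".toList.map (fun c => g.push c))) [""] from by decide]
    exact pv_fold_eq S _ 1 (by decide)
  · by_cases h2 : q = 2
    · subst h2
      norm_num
      rw [show TWO_GRAMS = (PySem.List.pyRange 0 (2:Int) 1).foldl
        (fun gs _ => gs.flatMap (fun g => "ACGT".toList.map (fun c => g.push c))) [""] from by decide]
      exact pv_fold_eq S _ 2 (by decide)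
    · by_cases h3 : q = 3
      · subst h3
        norm_num
        rw [show THREE_GRAMS = (PySem.List.pyRange 0 (3:Int) 1).foldl
          (fun gs _ => gs.flatMap (fun g => "ACGT".toList.map (fun c => g.push c))) [""] from by decide]
        exact pv_fold_eq S _ 3 (by decide)
      · simp only [if_neg h1, if_neg h2, if_neg h3,
          if_neg (show ¬(q = 1 ∨ q = 2 ∨ q = 3) from by tauto)]
        rw [show FOUR_GRAMS = (PySem.List.pyRange 0 (4:Int) 1).foldl
          (fun gs _ => gs.flatMap (fun g => "ACGT".toList.map (fun c => g.push c))) [""] from by decide]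
        exact pv_fold_eq S _ 4 (by decide)
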